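-- pv_equiv track=rewrite | github.com/ai-pharm-AU/GOLDEN-GNN | code/work_alpha_gnn_20260212/task_20260219_gnn_feature_ablation/scripts/tune_gnn_structlite_tradeoff.py | expand_candidates
-- ===== SOURCE A (Python) =====
-- import itertools
-- from typing import Any
--
-- def expand_candidates(space: dict[str, list[Any]], max_candidates: int) -> list[dict[str, Any]]:
--     keys = sorted(space.keys())
--     vals = [space[k] for k in keys]
--     out: list[dict[str, Any]] = []
--     for items in itertools.product(*vals):
--         out.append({k: v for k, v in zip(keys, items)})
--         if max_candidates > 0 and len(out) >= max_candidates: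
--             break
--     return out
-- ===== SOURCE B (Python) =====
-- def _decode_at(vals, rem):
--     # mixed-radix decode of ordinal rem (last key varies fastest)
--     items = []
--     for v in reversed(vals):
--         rem, idx = divmod(rem, len(v))
--         items.append(v[idx])
--     items.reverse()
--     return items
--
--
-- def expand_candidates(space, max_candidates):
--     keys = sorted(space.keys())
--     vals = [space[k] for k in keys]
--     total = 1
--     for v in vals:
--         total *= len(v)
--     limit = total if max_candidates <= 0 else min(max_candidates, total)
--     return [dict(zip(keys, _decode_at(vals, i))) for i in range(limit)]
-- ===== Notes on version B (the rewrite author's own statement) =====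
-- stated objective: alternative
-- what changed: Replaces the lazy itertools.product loop with a break by a counted enumeration: the number of candidates is computed up front as a capped product of value-list lengths, and each candidate is decoded directly from its ordinal by mixed-radix divmod (last key fastest).
import Mathlib
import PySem

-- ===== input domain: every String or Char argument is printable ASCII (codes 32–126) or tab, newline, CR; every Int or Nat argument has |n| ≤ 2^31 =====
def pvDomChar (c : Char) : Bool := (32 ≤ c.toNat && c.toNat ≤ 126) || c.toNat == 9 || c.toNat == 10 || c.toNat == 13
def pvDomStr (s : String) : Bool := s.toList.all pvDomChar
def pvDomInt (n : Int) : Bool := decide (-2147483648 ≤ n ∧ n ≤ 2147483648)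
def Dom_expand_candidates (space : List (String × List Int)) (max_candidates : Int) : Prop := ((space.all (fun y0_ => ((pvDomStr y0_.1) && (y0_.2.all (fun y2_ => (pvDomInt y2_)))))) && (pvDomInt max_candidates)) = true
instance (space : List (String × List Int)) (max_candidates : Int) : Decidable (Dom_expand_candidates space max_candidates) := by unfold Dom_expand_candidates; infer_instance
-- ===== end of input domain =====

-- B replaces the lazy itertools.product loop with a counted enumeration that decodes each
-- candidate directly from its ordinal by mixed-radix divmod; return values proved equal.

-- ===== PORT A =====
-- itertools.product(*vals) as a list (rightmost factor varies fastest)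
def pvProdA : List (List Int) → List (List Int)
  | [] => [[]]
  | v :: vs => v.flatMap (fun x => (pvProdA vs).map (x :: ·))

-- the 'for items in product: out.append({...}); if mc > 0 and len(out) >= mc: break' loop;
-- n = len(out) before the current iteration
def pvLoopA (keys : List String) (mc : Int) : List (List Int) → Int → List (List (String × Int))
  | [], _ => []
  | items :: rest, n =>
      let d := keys.zip items
      if mc > 0 ∧ n + 1 ≥ mc then [d] else d :: pvLoopA keys mc rest (n + 1)

def expand_candidates (space : List (String × List Int)) (max_candidates : Int) : List (List (String × Int)) :=
  let keys := PySem.List.sorted (PySem.List.dedup (space.map (·.1))) (fun k => k) false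
  let vals := keys.map (fun k => (space.lookup k).getD [])
  pvLoopA keys max_candidates (pvProdA vals) 0

-- ===== PORT B =====
-- _decode_at(vals, rem): 'for v in reversed(vals): rem, idx = divmod(rem, len(v)); items.append(v[idx])'
-- then items.reverse(); the total pyGet?/floordiv/mod never hit their guard values: decode is only
-- called with 0 ≤ rem < product of the (then positive) lengths
def pvDecodeB (vals : List (List Int)) (rem : Int) : List Int :=
  (vals.reverse.foldl
    (fun (st : Int × List Int) v =>
      ((PySem.Int.floordiv st.1 (v.length : Int)),
       st.2 ++ [(PySem.List.pyGet? v (PySem.Int.mod st.1 (v.length : Int))).getD 0]))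
    (rem, [])).2.reverse

def expand_candidates_alt (space : List (String × List Int)) (max_candidates : Int) : List (List (String × Int)) :=
  let keys := PySem.List.sorted (PySem.List.dedup (space.map (·.1))) (fun k => k) false
  let vals := keys.map (fun k => (space.lookup k).getD [])
  let total := vals.foldl (fun a v => a * (v.length : Int)) 1
  let limit := if max_candidates ≤ 0 then total else min max_candidates total
  (PySem.List.pyRange 0 limit 1).map (fun i => keys.zip (pvDecodeB vals i))

-- ===== PRECONDITION & SPEC =====
def Spec_expand_candidates (space : List (String × List Int)) (max_candidates : Int) (out : List (List (String × Int))) : Prop := out = expand_candidates_alt space max_candidates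
instance (space : List (String × List Int)) (max_candidates : Int) (out : List (List (String × Int))) : Decidable (Spec_expand_candidates space max_candidates out) := by unfold Spec_expand_candidates; infer_instance

-- ===== CLAIM (what is proved, stated in full; the proofs are below) =====
def Claim_equal_expand_candidates : Prop := ∀ (space : List (String × List Int)) (max_candidates : Int), Dom_expand_candidates space max_candidates → Spec_expand_candidates space max_candidates (expand_candidates space max_candidates)

-- ===== LEMMAS AND PROOFS =====

-- total number of candidates, as a Nat
def pvT (vs : List (List Int)) : Nat := (vs.map List.length).prod

-- proof-side recursive presentation of the mixed-radix decode
def pvDecodeR : List (List Int) → Int → List Int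
  | [], _ => []
  | v :: vs, i =>
      (PySem.List.pyGet? v (PySem.Int.floordiv i (pvT vs : Int))).getD 0
        :: pvDecodeR vs (PySem.Int.mod i (pvT vs : Int))

lemma pvT_cons (v : List Int) (vs : List (List Int)) : pvT (v :: vs) = v.length * pvT vs := by
  simp [pvT]

lemma pv_foldl_total (vs : List (List Int)) (a : Int) :
    vs.foldl (fun a w => a * (w.length : Int)) a = a * (pvT vs : Int) := by
  induction vs generalizing a with
  | nil => simp [pvT]
  | cons v vs ih => simp only [List.foldl_cons, ih, pvT_cons]; push_cast; ring

-- the reversed divmod loop of B computes quotient by the full radix and the recursive decode of the rest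
lemma pv_fold_decode (vs : List (List Int)) :
    ∀ (n : Nat) (acc : List Int),
      vs.reverse.foldl
          (fun (st : Int × List Int) v =>
            ((PySem.Int.floordiv st.1 (v.length : Int)),
             st.2 ++ [(PySem.List.pyGet? v (PySem.Int.mod st.1 (v.length : Int))).getD 0]))
          ((n : Int), acc)
        = (((n / pvT vs : Nat) : Int), acc ++ (pvDecodeR vs ((n % pvT vs : Nat) : Int)).reverse) := by
  induction vs with
  | nil => intro n acc; simp [pvT, pvDecodeR]
  | cons v vs ih =>
    intro n acc
    rw [List.reverse_cons, List.foldl_append, ih n acc]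
    simp only [List.foldl_cons, List.foldl_nil, PySem.Int.floordiv_natCast, PySem.Int.mod_natCast]
    rw [Prod.mk.injEq]
    refine ⟨?_, ?_⟩
    · rw [Nat.div_div_eq_div_mul, pvT_cons, Nat.mul_comm]
    · rw [pvDecodeR, pvT_cons]
      have h1 : n / pvT vs % v.length = n % (v.length * pvT vs) / pvT vs := by
        rw [Nat.mul_comm v.length (pvT vs), Nat.mod_mul_right_div_self]
      have h2 : n % (v.length * pvT vs) % pvT vs = n % pvT vs := by
        exact Nat.mod_mod_of_dvd n ⟨v.length, Nat.mul_comm v.length (pvT vs)⟩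
      rw [PySem.Int.floordiv_natCast, PySem.Int.mod_natCast, h1, h2, List.reverse_cons,
        List.append_assoc]

lemma pvDecodeB_eq_pvDecodeR (vals : List (List Int)) (n : Nat) (hn : n < pvT vals) :
    pvDecodeB vals (n : Int) = pvDecodeR vals (n : Int) := by
  rw [pvDecodeB, pv_fold_decode vals n [], List.nil_append, List.reverse_reverse,
    Nat.mod_eq_of_lt hn]

lemma pv_decode_cons (v : List Int) (vs : List (List Int)) (p i : Nat)
    (hp : p < v.length) (hi : i < pvT vs) :
    pvDecodeR (v :: vs) ((p * pvT vs + i : Nat) : Int) = v[p] :: pvDecodeR vs (i : Int) := by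
  have hT : 0 < pvT vs := by omega
  have hdiv : (p * pvT vs + i) / pvT vs = p := by
    rw [Nat.add_comm, Nat.add_mul_div_right i p hT, Nat.div_eq_of_lt hi, Nat.zero_add]
  have hmod : (p * pvT vs + i) % pvT vs = i := by
    rw [Nat.add_comm, Nat.add_mul_mod_self_right, Nat.mod_eq_of_lt hi]
  simp only [pvDecodeR, PySem.Int.floordiv_natCast, PySem.Int.mod_natCast, hdiv, hmod,
    PySem.List.pyGet?_natCast, List.getElem?_eq_getElem hp, Option.getD_some]

-- one block of the cartesian product versus a contiguous run of ordinals
lemma pv_block (vs : List (List Int))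
    (ih : pvProdA vs = (List.range (pvT vs)).map (fun (n : Nat) => pvDecodeR vs (n : Int))) :
    ∀ (suf pre : List Int),
      (List.range (suf.length * pvT vs)).map
          (fun j => pvDecodeR ((pre ++ suf) :: vs) ((pre.length * pvT vs + j : Nat) : Int))
        = suf.flatMap (fun x => (pvProdA vs).map (x :: ·)) := by
  intro suf
  induction suf with
  | nil => intro pre; simp
  | cons x suf ihs =>
    intro pre
    by_cases hT : pvT vs = 0
    · simp only [hT] at ih ⊢
      simp only [List.range_zero] at ih
      simp [ih]
    · have hT' : 0 < pvT vs := Nat.pos_of_ne_zero hT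
      have hsplit : (x :: suf).length * pvT vs = pvT vs + suf.length * pvT vs := by
        simp only [List.length_cons]; ring
      rw [hsplit, List.range_add, List.map_append, List.map_map, List.flatMap_cons]
      congr 1
      · rw [ih, List.map_map]
        apply List.map_congr_left
        intro j hj
        have hj' : j < pvT vs := List.mem_range.mp hj
        have hp : pre.length < (pre ++ x :: suf).length := by simp
        have hd := pv_decode_cons (pre ++ x :: suf) vs pre.length j hp hj'
        have hx : (pre ++ x :: suf)[pre.length]'hp = x := by simp
        simp only [Function.comp_apply]
        rw [hd, hx]
      · have hrec := ihs (pre ++ [x])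
        rw [← hrec]
        apply List.map_congr_left
        intro j _
        simp only [Function.comp_apply]
        have harg : ((pre.length * pvT vs + (pvT vs + j) : Nat) : Int)
            = (((pre ++ [x]).length * pvT vs + j : Nat) : Int) := by
          simp only [List.length_append, List.length_singleton]
          push_cast
          ring
        rw [List.append_cons, harg]

lemma pv_prod_eq_decode (vs : List (List Int)) :
    pvProdA vs = (List.range (pvT vs)).map (fun (n : Nat) => pvDecodeR vs (n : Int)) := by
  induction vs with
  | nil => simp [pvProdA, pvT, pvDecodeR]
  | cons v vs ih =>
    have hb := pv_block vs ih v []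
    simp only [List.nil_append, List.length_nil, Nat.zero_mul, Nat.zero_add] at hb
    rw [show pvProdA (v :: vs) = v.flatMap (fun x => (pvProdA vs).map (x :: ·)) from rfl,
      pvT_cons, ← hb]

lemma pv_loopA_nocap (keys : List String) (mc : Int) (hmc : mc ≤ 0) :
    ∀ (items : List (List Int)) (n : Int), pvLoopA keys mc items n = items.map (keys.zip ·) := by
  intro items
  induction items with
  | nil => intro n; simp [pvLoopA]
  | cons d rest ih => intro n; simp [pvLoopA, ih]; omega

lemma pv_loopA_cap (keys : List String) (mc : Int) (hmc : 0 < mc) :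
    ∀ (items : List (List Int)) (n : Int), 0 ≤ n → n < mc →
      pvLoopA keys mc items n = (items.take (mc - n).toNat).map (keys.zip ·) := by
  intro items
  induction items with
  | nil => intro n _ _; simp [pvLoopA]
  | cons d rest ih =>
    intro n hn hlt
    by_cases h : n + 1 ≥ mc
    · have h1 : (mc - n).toNat = 1 := by omega
      simp [pvLoopA, hmc, h, h1]
    · have h1 : (mc - n).toNat = (mc - (n + 1)).toNat + 1 := by omega
      simp [pvLoopA, hmc, h, h1, ih (n + 1) (by omega) (by omega)]

-- the two pipelines agree for ANY keys / value lists
lemma pv_main (keys : List String) (vals : List (List Int)) (mc : Int) :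
    pvLoopA keys mc (pvProdA vals) 0 =
      (PySem.List.pyRange 0
          (if mc ≤ 0 then vals.foldl (fun a v => a * (v.length : Int)) 1
           else min mc (vals.foldl (fun a v => a * (v.length : Int)) 1)) 1).map
        (fun i => keys.zip (pvDecodeB vals i)) := by
  rw [pv_foldl_total, one_mul]
  by_cases hmc : mc ≤ 0
  · rw [if_pos hmc, pv_loopA_nocap keys mc hmc _ 0, pv_prod_eq_decode, List.map_map,
      PySem.List.pyRange_one, List.map_map]
    have hn : ((((pvT vals : Nat) : Int)) - 0).toNat = pvT vals := by omega
    rw [hn]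
    apply List.map_congr_left
    intro j hj
    have hj' : j < pvT vals := List.mem_range.mp hj
    simp [pvDecodeB_eq_pvDecodeR vals j hj']
  · have hmc' : 0 < mc := by omega
    rw [if_neg hmc, pv_loopA_cap keys mc hmc' _ 0 le_rfl hmc', pv_prod_eq_decode,
      ← List.map_take, List.take_range, List.map_map, PySem.List.pyRange_one, List.map_map]
    have hn : ((min mc ((pvT vals : Nat) : Int)) - 0).toNat = min (mc - 0).toNat (pvT vals) := by
      omega
    rw [hn]
    apply List.map_congr_left
    intro j hj
    have hj' : j < pvT vals := by
      have := List.mem_range.mp hj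
      omega
    simp [pvDecodeB_eq_pvDecodeR vals j hj']

-- ===== VERDICT (by name: the statement is the Claim_ definition above) =====
theorem expand_candidates_spec : Claim_equal_expand_candidates := by
  intro space mc _
  show expand_candidates space mc = expand_candidates_alt space mc
  unfold expand_candidates expand_candidates_alt
  exact pv_main _ _ _
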